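-- pv_equiv track=rewrite | github.com/icmpnorequest/URL_Reputation_Classification | Feature Comparison/Lexical.py | Total_delims
-- ===== SOURCE A (Python) =====
-- def Total_delims(str):
--
--     delim = ['-', '_', '?', '=', '&']
--     count = 0
--     for i in str:
--         for j in delim:
--             if i == j:
--                 count += 1
--     return count
-- ===== SOURCE B (Python) =====
-- def Total_delims(str):
--     freq = {}
--     for ch in str:
--         freq[ch] = freq.get(ch, 0) + 1
--     return sum(freq.get(d, 0) for d in ['-', '_', '?', '=', '&'])
-- ===== Notes on version B (the rewrite author's own statement) =====
-- stated objective: faster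
-- what changed: Replaces the nested char-by-delimiter loop with a frequency table built in one pass over the string, followed by a fixed five-element lookup-and-sum over the delimiter list.
import Mathlib
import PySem

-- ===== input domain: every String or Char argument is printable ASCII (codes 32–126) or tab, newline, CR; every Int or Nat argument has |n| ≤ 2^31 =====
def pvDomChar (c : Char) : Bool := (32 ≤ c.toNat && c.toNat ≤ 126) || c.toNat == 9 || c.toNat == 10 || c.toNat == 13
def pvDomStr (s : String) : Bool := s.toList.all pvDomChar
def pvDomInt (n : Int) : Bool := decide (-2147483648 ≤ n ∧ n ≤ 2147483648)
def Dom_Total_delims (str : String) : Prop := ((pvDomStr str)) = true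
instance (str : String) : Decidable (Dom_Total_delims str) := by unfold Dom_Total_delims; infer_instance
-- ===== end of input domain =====

-- B replaces A's nested char×delimiter loop by a one-pass character frequency table
-- followed by summing the counts of the five delimiters (alternative decomposition).


-- ===== PORT A =====
-- nested loop: for each char of str, scan the delimiter list and bump count on a match
def Total_delims (str : String) : Int :=
  let delim : List Char := ['-', '_', '?', '=', '&']
  str.toList.foldl
    (fun count i => delim.foldl (fun c j => if i == j then c + 1 else c) count) 0

-- ===== PORT B =====
-- one pass building a frequency dict (freq[ch] = freq.get(ch,0) + 1), then sum the
-- delimiters' counts with zero-default lookups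
def Total_delims_alt (str : String) : Int :=
  let freq : PySem.Dict Char Int :=
    str.toList.foldl (fun d ch => d.insert ch (d.getD ch 0 + 1)) PySem.Dict.empty
  (['-', '_', '?', '=', '&'].foldl (fun s d => s + freq.getD d 0) 0)

-- ===== PRECONDITION & SPEC =====
def Spec_Total_delims (str : String) (out : Int) : Prop := out = Total_delims_alt str
instance (str : String) (out : Int) : Decidable (Spec_Total_delims str out) := by unfold Spec_Total_delims; infer_instance

-- ===== CLAIM (what is proved, stated in full; the proofs are below) =====
def Claim_equal_Total_delims : Prop := ∀ (str : String), Dom_Total_delims str → Spec_Total_delims str (Total_delims str)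

-- ===== LEMMAS AND PROOFS =====

-- total count of the five delimiters in a char list
def pvCnt (L : List Char) : Int :=
  (L.count '-' : Int) + L.count '_' + L.count '?' + L.count '=' + L.count '&'

theorem foldlA_eq_cnt (L : List Char) (acc : Int) :
    L.foldl (fun count i =>
        (['-', '_', '?', '=', '&'] : List Char).foldl
          (fun c j => if i == j then c + 1 else c) count) acc
      = acc + pvCnt L := by
  induction L generalizing acc with
  | nil => simp [pvCnt]
  | cons c rest ih =>
    rw [List.foldl_cons, ih]
    simp only [List.foldl_cons, List.foldl_nil, pvCnt, List.count_cons]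
    push_cast
    split_ifs <;> simp_all <;> omega

theorem Total_delims_spec : Claim_equal_Total_delims := by
  intro str _
  unfold Spec_Total_delims
  simp only [Total_delims, Total_delims_alt]
  rw [foldlA_eq_cnt]
  simp only [PySem.Dict.foldl_insert_getD_add_one_eq_counter, List.foldl_cons, List.foldl_nil,
    PySem.Dict.getD_counter, pvCnt]
  omega
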